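-- pv_equiv track=rewrite | github.com/pypi-data/pypi-mirror-167 | packages/typetree/typetree-0.1.0.tar.gz/typetree-0.1.0/typetree/typetree.py | _group_to_map
-- ===== SOURCE A (Python) =====
-- def _group_to_map(v: list[set[int]]) -> dict[tuple[int, int], int]:
--     """Argument v is a list of indices grouped in sets that map to
--     the same structure in a Sequence tree. Their positions indicate
--     where they map to. Example:
--         branches = [A, B, A, A, C, A, B]
--         unique_branches = [A, B, C]
--         v = [{0, 2, 3, 5}, {1, 6}, {4}]
--     means that A shows in indices v[0] = {0, 2, 3, 5}, B shows in
--     indices v[1] = {1, 6}, and C shows in v[2] = {4}.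
--         The return value is a dict of sequential ranges of indices
--     as keys and their mapping to unique_branches. In the previous
--     case it will return {(0, 1): 0, (1, 2): 1, (2, 4): 0, (4, 5): 2,
--     (5, 6): 0, (6, 7): 1}."""
--
--     if not v:
--         return {}
--     u = {}
--     for k, s in enumerate(v):
--         if not s:
--             continue
--         sv = list(sorted(s))
--         su = [(sv[0], sv[0] + 1)]
--         for x in sv[1:]:
--             if x == su[-1][1]:
--                 su[-1] = (su[-1][0], x + 1)
--             else:
--                 su.append((x, x + 1))
--         for x in su:
--             u[x] = k
--     # noinspection PyTypeChecker
--     return dict(sorted(u.items()))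
-- ===== SOURCE B (Python) =====
-- def _group_to_map(v):
--     """Same mapping as A, but runs are found by hash-membership boundary
--     detection (x is a run start iff x-1 is not in the set; the end is the
--     first missing integer after it) instead of sorting each set and
--     coalescing consecutive elements."""
--     u = {}
--     for k, s in enumerate(v):
--         for x in s:
--             if x - 1 not in s:
--                 e = x + 1
--                 while e in s:
--                     e += 1
--                 u[(x, e)] = k
--     return dict(sorted(u.items()))
-- ===== Notes on version B (the rewrite author's own statement) =====
-- stated objective: alternative
-- what changed: Runs are found by hash-membership boundary detection (x starts a run iff x-1 is not in the set, the end is the first missing integer after x) instead of sorting every set and coalescing consecutive elements; only the final dict is sorted.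
import Mathlib
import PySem

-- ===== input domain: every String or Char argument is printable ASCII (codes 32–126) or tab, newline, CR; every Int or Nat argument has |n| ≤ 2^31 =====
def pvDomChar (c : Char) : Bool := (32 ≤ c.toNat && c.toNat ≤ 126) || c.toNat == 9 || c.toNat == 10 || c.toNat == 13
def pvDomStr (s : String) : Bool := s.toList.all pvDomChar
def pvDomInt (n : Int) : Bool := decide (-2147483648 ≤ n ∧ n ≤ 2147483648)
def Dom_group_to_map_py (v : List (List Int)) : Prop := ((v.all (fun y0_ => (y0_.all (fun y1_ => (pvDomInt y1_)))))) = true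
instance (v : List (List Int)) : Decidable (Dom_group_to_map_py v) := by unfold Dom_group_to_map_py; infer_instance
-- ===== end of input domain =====

-- B replaces A's per-set sort-and-coalesce run detection by hash-membership boundary
-- detection (x starts a run iff x-1 is not in the set; the end is the first missing
-- integer after x); the final sorted dict is the same.
-- Each Python set argument is represented by its list of distinct elements
-- (PySem.Set.ofList at the boundary); Python's tuple comparison in sorted(u.items())
-- is the lexicographic key pvKey below (exact: Python compares ((a, b), k) tuples
-- lexicographically).

-- Python's lexicographic order on the items ((a, b), k) of a dict keyed by int pairs.
def pvKey (p : (Int × Int) × Int) : Int ×ₗ (Int ×ₗ Int) := toLex (p.1.1, toLex (p.1.2, p.2))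

-- ===== PORT A =====
-- the body of A's coalescing loop: `if x == su[-1][1]: su[-1] = (su[-1][0], x+1) else: su.append((x, x+1))`
def pvCoalesce (su : List (Int × Int)) (x : Int) : List (Int × Int) :=
  if x = (PySem.List.pyGetD su (-1) (0, 0)).2 then
    su.dropLast ++ [((PySem.List.pyGetD su (-1) (0, 0)).1, x + 1)]
  else su ++ [(x, x + 1)]

-- `su = [(sv[0], sv[0]+1)]; for x in sv[1:]: …` (only called with sv nonempty)
def pvRunsA (sv : List Int) : List (Int × Int) :=
  (PySem.List.slice sv (some 1) none).foldl pvCoalesce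
    [(PySem.List.pyGetD sv 0 0, PySem.List.pyGetD sv 0 0 + 1)]

-- one iteration of A's outer loop: skip empty set, sort it, coalesce, `for x in su: u[x] = k`
def pvInsA (k : Int) (u : PySem.Dict (Int × Int) Int) (s : PySem.Set Int) :
    PySem.Dict (Int × Int) Int :=
  if s = [] then u
  else (pvRunsA (PySem.List.sorted s (fun x => x) false)).foldl (fun u p => u.insert p k) u

def group_to_map_py (v : List (List Int)) : List (Int × Int × Int) :=
  if v = [] then []
  else
    let u := (PySem.List.enumerate v 0).foldl
      (fun u ks => pvInsA ks.1 u (PySem.Set.ofList ks.2)) PySem.Dict.empty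
    (PySem.List.sorted u.items pvKey false).map (fun p => (p.1.1, p.1.2, p.2))

-- ===== PORT B =====
-- `e = x + 1; while e in s: e += 1` — fuel s.length is exact: each passed test consumes a
-- distinct element of s greater than x, and x ∈ s too, so the loop runs < s.length times.
def pvFindEnd (s : PySem.Set Int) (e : Int) : Nat → Int
  | 0 => e
  | n + 1 => if PySem.Set.contains s e then pvFindEnd s (e + 1) n else e

-- one iteration of B's outer loop: `for x in s: if x-1 not in s: … u[(x, e)] = k`
-- (the set's iteration order does not affect the result: keys made from one set are
-- distinct, so the dict's value map is order-independent, and its items are sorted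
-- at the end).
def pvInsB (k : Int) (u : PySem.Dict (Int × Int) Int) (s : PySem.Set Int) :
    PySem.Dict (Int × Int) Int :=
  s.foldl (fun u x =>
    if PySem.Set.contains s (x - 1) then u
    else u.insert (x, pvFindEnd s (x + 1) s.length) k) u

def group_to_map_py_alt (v : List (List Int)) : List (Int × Int × Int) :=
  let u := (PySem.List.enumerate v 0).foldl
    (fun u ks => pvInsB ks.1 u (PySem.Set.ofList ks.2)) PySem.Dict.empty
  (PySem.List.sorted u.items pvKey false).map (fun p => (p.1.1, p.1.2, p.2))

-- ===== PRECONDITION & SPEC =====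
def Spec_group_to_map_py (v : List (List Int)) (out : List (Int × Int × Int)) : Prop := out = group_to_map_py_alt v
instance (v : List (List Int)) (out : List (Int × Int × Int)) : Decidable (Spec_group_to_map_py v out) := by unfold Spec_group_to_map_py; infer_instance

-- ===== CLAIM (what is proved, stated in full; the proofs are below) =====
def Claim_equal_group_to_map_py : Prop := ∀ (v : List (List Int)), Dom_group_to_map_py v → Spec_group_to_map_py v (group_to_map_py v)

-- ===== LEMMAS AND PROOFS =====

theorem pvKey_inj : Function.Injective pvKey := by
  intro p q h
  have h' := congrArg ofLex h
  simp [pvKey] at h'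
  obtain ⟨h1, h2, h3⟩ := h'
  exact Prod.ext (Prod.ext h1 h2) h3

-- the value B's while loop computes: the first integer ≥ x outside s
theorem pvFindEnd_eq (s : PySem.Set Int) :
    ∀ (fuel : Nat) (x g : Int), x ≤ g → (∀ i, x ≤ i → i < g → i ∈ s) → g ∉ s →
      g - x ≤ (fuel : Int) → pvFindEnd s x fuel = g := by
  intro fuel
  induction fuel with
  | zero => intro x g hle _ _ hf; simp [pvFindEnd]; omega
  | succ n ih =>
    intro x g hle hin hout hf
    by_cases hx : x ∈ s
    · have hxg : x < g := by
        rcases lt_or_eq_of_le hle with h | h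
        · exact h
        · exact absurd (h ▸ hx) hout
      simp only [pvFindEnd, PySem.Set.contains]
      rw [if_pos (by simpa using hx)]
      exact ih (x+1) g (by omega) (fun i h1 h2 => hin i (by omega) h2) hout (by omega)
    · have : x = g := by
        by_contra hne
        exact hx (hin x le_rfl (by omega))
      simp only [pvFindEnd, PySem.Set.contains]
      rw [if_neg (by simpa using hx)]
      exact this

-- A's run list as a structural recursion (current block [a, e), remaining elements)
def pvBlocks (a e : Int) : List Int → List (Int × Int)
  | [] => [(a, e)]
  | x :: r => if x = e then pvBlocks a (e + 1) r else (a, e) :: pvBlocks x (x + 1) r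

theorem pvFoldl_coalesce (rest : List Int) :
    ∀ (acc : List (Int × Int)) (a e : Int),
      rest.foldl pvCoalesce (acc ++ [(a, e)]) = acc ++ pvBlocks a e rest := by
  induction rest with
  | nil => intro acc a e; simp [pvBlocks]
  | cons x r ih =>
    intro acc a e
    simp only [List.foldl_cons, pvCoalesce, PySem.List.pyGetD_neg_one_append_singleton,
      List.dropLast_concat, pvBlocks]
    by_cases hx : x = e
    · subst hx
      rw [if_pos rfl, if_pos rfl]
      exact ih acc a (x+1)
    · rw [if_neg hx, if_neg hx]
      have := ih (acc ++ [(a, e)]) x (x+1)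
      simpa using this

theorem pvRunsA_eq_blocks (x0 : Int) (rest : List Int) :
    pvRunsA (x0 :: rest) = pvBlocks x0 (x0 + 1) rest := by
  unfold pvRunsA
  rw [PySem.List.slice_from_one]
  have := pvFoldl_coalesce rest [] x0 (x0 + 1)
  simpa [PySem.List.pyGetD_zero_cons] using this

-- an integer interval contained in a list bounds the list's length from below
theorem pvIntervalLen (s : List Int) (a e : Int)
    (h : ∀ i, a ≤ i → i < e → i ∈ s) : e - a ≤ (s.length : Int) := by
  classical
  have hsub : PySem.List.pyRange a e 1 ⊆ s := by
    intro i hi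
    rw [PySem.List.mem_pyRange_one] at hi
    exact h i hi.1 hi.2
  have hlen : (PySem.List.pyRange a e 1).length ≤ s.length := by
    calc (PySem.List.pyRange a e 1).length
        = (PySem.List.pyRange a e 1).toFinset.card :=
          (List.toFinset_card_of_nodup (PySem.List.nodup_pyRange_one a e)).symm
      _ ≤ s.toFinset.card := Finset.card_le_card (by
          intro x hx; simp only [List.mem_toFinset] at hx ⊢; exact hsub hx)
      _ ≤ s.length := s.toFinset_card_le
  have := PySem.List.length_pyRange_one a e
  omega

-- the crux: on a strictly increasing remainder of the set s, the coalescing loop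
-- produces exactly the boundary-detected runs
theorem pvBlocks_eq_map (s : PySem.Set Int) :
    ∀ (rest : List Int) (a e : Int),
      rest.Pairwise (· < ·) → (∀ y ∈ rest, e ≤ y) → (∀ i, a ≤ i → i < e → i ∈ s) →
      a < e → (∀ y, y ∈ s → e ≤ y → y ∈ rest) → (∀ y ∈ rest, y ∈ s) →
      pvBlocks a e rest =
        (a :: rest.filter (fun x => !decide ((x - 1) ∈ s))).map
          (fun x => (x, pvFindEnd s (x + 1) s.length)) := by
  intro rest
  induction rest with
  | nil =>
    intro a e _ _ h3 h4 h5 _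
    have hout : e ∉ s := fun he => by simpa using h5 e he le_rfl
    have hend : pvFindEnd s (a + 1) s.length = e :=
      pvFindEnd_eq s s.length (a+1) e (by omega)
        (fun i h1 h2 => h3 i (by omega) h2) hout
        (by have := pvIntervalLen s a e h3; omega)
    simp [pvBlocks, hend]
  | cons x r ih =>
    intro a e h1 h2 h3 h4 h5 h6
    rcases lt_or_eq_of_le (h2 x (by simp)) with hxe | hxe
    · -- x > e : emit the current block, start a new one at x
      have hPx : (x - 1) ∉ s := by
        intro hmem
        rcases List.mem_cons.1 (h5 (x-1) hmem (by omega)) with h | h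
        · omega
        · have := List.rel_of_pairwise_cons h1 h
          omega
      have hout : e ∉ s := by
        intro he
        rcases List.mem_cons.1 (h5 e he le_rfl) with h | h
        · omega
        · have := List.rel_of_pairwise_cons h1 h; omega
      have hend : pvFindEnd s (a + 1) s.length = e :=
        pvFindEnd_eq s s.length (a+1) e (by omega)
          (fun i hi1 hi2 => h3 i (by omega) hi2) hout
          (by have := pvIntervalLen s a e h3; omega)
      have htail := ih x (x+1) (List.pairwise_cons.1 h1).2
        (fun y hy => by have := List.rel_of_pairwise_cons h1 hy; omega)
        (fun i hi1 hi2 => h6 i (List.mem_cons.2 (Or.inl (by omega))))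
        (by omega)
        (fun y hy hle => by
          rcases List.mem_cons.1 (h5 y hy (by omega)) with h | h
          · omega
          · exact h)
        (fun y hy => h6 y (by simp [hy]))
      simp only [pvBlocks, if_neg (by omega : ¬ x = e), List.filter_cons,
        Bool.not_eq_true', decide_eq_false_iff_not]
      rw [if_pos (by simpa using hPx)]
      simp only [List.map_cons, hend]
      rw [htail]
      simp
    · -- x = e : the block absorbs x
      subst hxe
      have hPx : (e - 1) ∈ s := h3 (e-1) (by omega) (by omega)
      have hnext := ih a (e+1) (List.pairwise_cons.1 h1).2
        (fun y hy => by have := List.rel_of_pairwise_cons h1 hy; omega)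
        (fun i hi1 hi2 => by
          rcases lt_or_eq_of_le (by omega : i ≤ e) with h | h
          · exact h3 i hi1 h
          · subst h; exact h6 i (List.mem_cons.2 (Or.inl rfl)))
        (by omega)
        (fun y hy hle => by
          rcases List.mem_cons.1 (h5 y hy (by omega)) with h | h
          · omega
          · exact h)
        (fun y hy => h6 y (List.mem_cons.2 (Or.inr hy)))
      simp only [pvBlocks, List.filter_cons, Bool.not_eq_true',
        decide_eq_false_iff_not]
      rw [if_neg (not_not_intro hPx)]
      exact hnext

-- get? after B's conditional-insert loop (constant value k)
theorem pvGet_foldl_cond_insert (k : Int) (s : PySem.Set Int) :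
    ∀ (l : List Int) (d : PySem.Dict (Int × Int) Int) (key : Int × Int),
      (l.foldl (fun u x =>
          if PySem.Set.contains s (x - 1) then u
          else u.insert (x, pvFindEnd s (x + 1) s.length) k) d).get? key =
        if key ∈ (l.filter (fun x => !decide ((x - 1) ∈ s))).map
            (fun x => (x, pvFindEnd s (x + 1) s.length)) then some k
        else d.get? key := by
  intro l
  induction l with
  | nil => intro d key; simp
  | cons x t ih =>
    intro d key
    simp only [List.foldl_cons, List.filter_cons]
    by_cases hm : (x - 1) ∈ s
    · rw [if_pos (by simp [PySem.Set.contains, hm])]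
      rw [ih d key]
      simp only [hm, decide_true, Bool.not_true]
      rfl
    · rw [if_neg (by simp [PySem.Set.contains, hm])]
      rw [ih _ key]
      simp only [hm, decide_false, Bool.not_false, if_pos]
      by_cases hk : key ∈ (t.filter (fun x => !decide ((x - 1) ∈ s))).map
          (fun x => (x, pvFindEnd s (x + 1) s.length))
      · simp [hk]
      · simp only [hk, List.map_cons, List.mem_cons]
        by_cases hkey : key = (x, pvFindEnd s (x + 1) s.length)
        · simp [hkey, PySem.Dict.get?_insert_self]
        · simp [hkey, PySem.Dict.get?_insert_of_ne _ _ hkey]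

-- get? after A's plain insert loop (constant value k)
theorem pvGet_foldl_insert (k : Int) :
    ∀ (l : List (Int × Int)) (d : PySem.Dict (Int × Int) Int) (key : Int × Int),
      (l.foldl (fun u p => u.insert p k) d).get? key =
        if key ∈ l then some k else d.get? key := by
  intro l
  induction l with
  | nil => intro d key; simp
  | cons x t ih =>
    intro d key
    simp only [List.foldl_cons]
    rw [ih _ key]
    by_cases hk : key ∈ t
    · simp [hk]
    · by_cases hkey : key = x
      · simp [hkey, PySem.Dict.get?_insert_self]
      · simp [hkey, hk, PySem.Dict.get?_insert_of_ne _ _ hkey]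

-- per-set: both insertion loops update get? identically
theorem pvIns_get?_eq (k : Int) (s : PySem.Set Int) (hnd : List.Nodup s)
    (dA dB : PySem.Dict (Int × Int) Int) (hd : ∀ key, dA.get? key = dB.get? key) :
    ∀ key, (pvInsA k dA s).get? key = (pvInsB k dB s).get? key := by
  intro key
  unfold pvInsA pvInsB
  by_cases hs : s = []
  · subst hs
    simpa using hd key
  · rw [if_neg hs]
    rw [pvGet_foldl_insert, pvGet_foldl_cond_insert]
    -- analyse the sorted set
    set sv := PySem.List.sorted s (fun x => x) false with hsv
    have hperm : sv.Perm s := PySem.List.sorted_perm s (fun x => x) false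
    have hmem : ∀ z, z ∈ sv ↔ z ∈ s := fun z => PySem.List.mem_sorted s (fun x => x) false z
    have hlt : sv.Pairwise (· < ·) := by
      have h1 := PySem.List.sorted_pairwise s (fun x => x)
      have h2 : sv.Nodup := hperm.nodup_iff.2 hnd
      exact (h1.and h2).imp (fun h => lt_of_le_of_ne h.1 h.2)
    have hsvne : sv ≠ [] := by
      intro h
      exact hs ((h ▸ hperm) : ([] : List Int).Perm s).symm.eq_nil
    obtain ⟨x0, tail, hx0⟩ := List.exists_cons_of_ne_nil hsvne
    rw [hx0]
    rw [pvRunsA_eq_blocks]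
    have hlt' : (x0 :: tail).Pairwise (· < ·) := hx0 ▸ hlt
    have hmem' : ∀ z, z ∈ x0 :: tail ↔ z ∈ s := fun z => hx0 ▸ hmem z
    have hblocks := pvBlocks_eq_map s tail x0 (x0 + 1)
      (List.pairwise_cons.1 hlt').2
      (fun y hy => by have := List.rel_of_pairwise_cons hlt' hy; omega)
      (fun i hi1 hi2 => by
        have : i = x0 := by omega
        subst this
        exact (hmem' i).1 (List.mem_cons.2 (Or.inl rfl)))
      (by omega)
      (fun y hy hle => by
        rcases List.mem_cons.1 ((hmem' y).2 hy) with h | h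
        · omega
        · exact h)
      (fun y hy => (hmem' y).1 (List.mem_cons.2 (Or.inr hy)))
    rw [hblocks]
    -- the two filtered start lists have the same members
    have hsetseq : ∀ z, z ∈ x0 :: tail.filter (fun x => !decide ((x - 1) ∈ s)) ↔
        z ∈ s.filter (fun x => !decide ((x - 1) ∈ s)) := by
      intro z
      have hx0start : (x0 - 1) ∉ s := by
        intro hmem0
        rcases List.mem_cons.1 ((hmem' (x0-1)).2 hmem0) with h | h
        · omega
        · have := List.rel_of_pairwise_cons hlt' h; omega
      simp only [List.mem_cons, List.mem_filter, Bool.not_eq_true', decide_eq_false_iff_not]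
      constructor
      · rintro (rfl | hz)
        · exact ⟨(hmem' z).1 (List.mem_cons.2 (Or.inl rfl)), hx0start⟩
        · exact ⟨(hmem' z).1 (List.mem_cons.2 (Or.inr hz.1)), hz.2⟩
      · rintro ⟨hzs, hzstart⟩
        rcases List.mem_cons.1 ((hmem' z).2 hzs) with h | h
        · exact Or.inl h
        · exact Or.inr ⟨h, hzstart⟩
    have hmapeq : (key ∈ (x0 :: tail.filter (fun x => !decide ((x - 1) ∈ s))).map
          (fun x => (x, pvFindEnd s (x + 1) s.length))) ↔
        (key ∈ (s.filter (fun x => !decide ((x - 1) ∈ s))).map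
          (fun x => (x, pvFindEnd s (x + 1) s.length))) := by
      simp only [List.mem_map]
      constructor
      · rintro ⟨z, hz, rfl⟩; exact ⟨z, (hsetseq z).1 hz, rfl⟩
      · rintro ⟨z, hz, rfl⟩; exact ⟨z, (hsetseq z).2 hz, rfl⟩
    by_cases hin : key ∈ (s.filter (fun x => !decide ((x - 1) ∈ s))).map
        (fun x => (x, pvFindEnd s (x + 1) s.length))
    · rw [if_pos (hmapeq.2 hin), if_pos hin]
    · rw [if_neg (fun h => hin (hmapeq.1 h)), if_neg hin]
      exact hd key


-- keys stay nodup through both loops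
-- a foldl of inserts keeps keys nodup
theorem pvFoldl_insert_nodup {β : Type} (f : PySem.Dict (Int × Int) Int → β → PySem.Dict (Int × Int) Int)
    (hf : ∀ d x, d.keys.Nodup → (f d x).keys.Nodup) :
    ∀ (l : List β) (d : PySem.Dict (Int × Int) Int), d.keys.Nodup → (l.foldl f d).keys.Nodup := by
  intro l
  induction l with
  | nil => intro d h; simpa
  | cons x t ih => intro d h; exact ih (f d x) (hf d x h)

theorem pvInsA_nodup_keys (k : Int) (u : PySem.Dict (Int × Int) Int) (s : PySem.Set Int)
    (h : u.keys.Nodup) : (pvInsA k u s).keys.Nodup := by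
  unfold pvInsA
  split
  · exact h
  · exact pvFoldl_insert_nodup _ (fun d p hd => PySem.Dict.nodup_keys_insert d p k hd) _ u h

theorem pvInsB_nodup_keys (k : Int) (u : PySem.Dict (Int × Int) Int) (s : PySem.Set Int)
    (h : u.keys.Nodup) : (pvInsB k u s).keys.Nodup := by
  unfold pvInsB
  exact pvFoldl_insert_nodup _ (fun d x hd => by
    split
    · exact hd
    · exact PySem.Dict.nodup_keys_insert d _ k hd) s u h

-- the two final dicts agree on get? and both have nodup keys
theorem pvDicts_agree (v : List (List Int)) :
    (∀ key, ((PySem.List.enumerate v 0).foldl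
        (fun u ks => pvInsA ks.1 u (PySem.Set.ofList ks.2)) PySem.Dict.empty).get? key =
      ((PySem.List.enumerate v 0).foldl
        (fun u ks => pvInsB ks.1 u (PySem.Set.ofList ks.2)) PySem.Dict.empty).get? key) ∧
    ((PySem.List.enumerate v 0).foldl
        (fun u ks => pvInsA ks.1 u (PySem.Set.ofList ks.2)) PySem.Dict.empty).keys.Nodup ∧
    ((PySem.List.enumerate v 0).foldl
        (fun u ks => pvInsB ks.1 u (PySem.Set.ofList ks.2)) PySem.Dict.empty).keys.Nodup := by
  refine ⟨?_, ?_, ?_⟩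
  · -- get? agreement, by induction over the enumerated sets
    suffices h : ∀ (l : List (List Int)) (k0 : Int) (dA dB : PySem.Dict (Int × Int) Int),
        (∀ key, dA.get? key = dB.get? key) →
        ∀ key, ((PySem.List.enumerate l k0).foldl
            (fun u ks => pvInsA ks.1 u (PySem.Set.ofList ks.2)) dA).get? key =
          ((PySem.List.enumerate l k0).foldl
            (fun u ks => pvInsB ks.1 u (PySem.Set.ofList ks.2)) dB).get? key by
      exact h v 0 _ _ (fun _ => rfl)
    intro l
    induction l with
    | nil => intro k0 dA dB hd key; simpa [PySem.List.enumerate] using hd key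
    | cons s t ih =>
      intro k0 dA dB hd key
      simp only [PySem.List.enumerate_cons, List.foldl_cons]
      exact ih (k0 + 1) _ _
        (pvIns_get?_eq k0 (PySem.Set.ofList s) (PySem.Set.nodup_ofList s) dA dB hd) key
  · exact pvFoldl_insert_nodup _
      (fun d ks hd => pvInsA_nodup_keys ks.1 d (PySem.Set.ofList ks.2) hd) _ _ (by simp)
  · exact pvFoldl_insert_nodup _
      (fun d ks hd => pvInsB_nodup_keys ks.1 d (PySem.Set.ofList ks.2) hd) _ _ (by simp)

-- dicts with nodup keys and the same get? have permuted item lists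
theorem pvItems_perm (dA dB : PySem.Dict (Int × Int) Int)
    (hA : dA.keys.Nodup) (hB : dB.keys.Nodup)
    (h : ∀ key, dA.get? key = dB.get? key) : dA.items.Perm dB.items := by
  have hmem : ∀ p : (Int × Int) × Int, p ∈ dA.items ↔ p ∈ dB.items := by
    intro p
    obtain ⟨k, v⟩ := p
    rw [← PySem.Dict.get?_eq_some_iff_mem_items dA k v hA,
        ← PySem.Dict.get?_eq_some_iff_mem_items dB k v hB, h k]
  have hndA : dA.items.Nodup :=
    List.Nodup.of_map (·.1) (by simpa only [PySem.Dict.keys] using hA)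
  have hndB : dB.items.Nodup :=
    List.Nodup.of_map (·.1) (by simpa only [PySem.Dict.keys] using hB)
  exact (List.perm_ext_iff_of_nodup hndA hndB).2 hmem

-- ===== VERDICT (by name: the statement is the Claim_ definition above) =====
theorem group_to_map_py_spec : Claim_equal_group_to_map_py := by
  intro v _
  show group_to_map_py v = group_to_map_py_alt v
  obtain ⟨hget, hA, hB⟩ := pvDicts_agree v
  have hperm := pvItems_perm _ _ hA hB hget
  have hsorted := PySem.List.sorted_eq_sorted_of_perm _ _ pvKey pvKey_inj hperm
  unfold group_to_map_py group_to_map_py_alt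
  split
  · subst v
    simp [PySem.List.enumerate, PySem.Dict.empty, PySem.List.sorted]
  · simp only []
    rw [hsorted]
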